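-- pv_equiv track=rewrite | github.com/LilyFire54/password_strength_checker | password_strength_checker.py | contains_dictionary_word
-- ===== SOURCE A (Python) =====
-- from typing import Dict, List, Tuple
--
-- DICTIONARY_WORDS = {
--     # Minimal list for demo. Replace/expand from wordlists in production.
--     "password", "welcome", "dragon", "princess", "football", "flower",
--     "shadow", "hunter", "purple", "fire", "lily", "kaizen", "summer",
-- }
--
-- def contains_dictionary_word(s: str) -> bool:
--     s_low = s.lower()
--     # Check direct words and leet-like simple variants
--     variants: List[str] = [s_low]
--     # Basic leetspeak reversal
--     table = str.maketrans({"0": "o", "1": "l", "3": "e", "5": "s", "7": "t", "@": "a", "$": "s"})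
--     variants.append(s_low.translate(table))
--
--     for word in DICTIONARY_WORDS:
--         for v in variants:
--             if word in v and len(word) >= 4:
--                 return True
--     return False
-- ===== SOURCE B (Python) =====
-- DICTIONARY_WORDS = {
--     "password", "welcome", "dragon", "princess", "football", "flower",
--     "shadow", "hunter", "purple", "fire", "lily", "kaizen", "summer",
-- }
--
-- _LEET = str.maketrans({"0": "o", "1": "l", "3": "e", "5": "s", "7": "t", "@": "a", "$": "s"})
--
--
-- def _build_trie(words):
--     # Array trie: children[n] maps a char to a child node, terminal[n] marks word ends.
--     children = [{}]
--     terminal = [False]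
--     for w in words:
--         cur = 0
--         for ch in w:
--             nxt = children[cur].get(ch)
--             if nxt is None:
--                 children.append({})
--                 terminal.append(False)
--                 nxt = len(children) - 1
--                 children[cur][ch] = nxt
--             cur = nxt
--         terminal[cur] = True
--     return children, terminal
--
--
-- _CHILDREN, _TERMINAL = _build_trie(sorted(DICTIONARY_WORDS))
--
--
-- def contains_dictionary_word(s: str) -> bool:
--     # One trie walk per starting position of the leet-translated lowercase form.
--     # The translation fixes every letter, so a word found in s.lower() is also found
--     # in the translated form; every word has length >= 4, so A's guard is vacuous.
--     t = s.lower().translate(_LEET)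
--     n = len(t)
--     for i in range(n):
--         cur = 0
--         for j in range(i, n):
--             nxt = _CHILDREN[cur].get(t[j])
--             if nxt is None:
--                 break
--             if _TERMINAL[nxt]:
--                 return True
--             cur = nxt
--     return False
-- ===== Notes on version B (the rewrite author's own statement) =====
-- stated objective: alternative
-- what changed: B builds an array trie from the sorted dictionary once and scans by walking the trie from each starting position of the single leet-translated lowercased variant, replacing A's nested word-by-variant substring-membership loop (and its vacuous len>=4 guard and redundant untranslated variant).
import Mathlib
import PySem

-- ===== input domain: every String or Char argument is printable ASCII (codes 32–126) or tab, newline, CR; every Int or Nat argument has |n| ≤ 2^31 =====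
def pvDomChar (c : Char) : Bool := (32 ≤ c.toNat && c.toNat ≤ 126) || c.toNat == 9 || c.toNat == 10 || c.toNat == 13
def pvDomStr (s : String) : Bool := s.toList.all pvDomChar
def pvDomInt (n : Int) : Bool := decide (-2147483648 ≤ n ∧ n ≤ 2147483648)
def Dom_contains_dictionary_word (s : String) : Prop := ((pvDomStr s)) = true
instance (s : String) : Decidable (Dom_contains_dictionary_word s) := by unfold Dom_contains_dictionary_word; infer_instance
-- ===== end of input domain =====

-- B replaces A's word-by-word substring scan with an array trie built once from the
-- sorted dictionary and one trie walk per starting position of the single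
-- leet-translated lowercased variant; "alternative": different data structure, similar cost here.

-- ===== PORT A =====
-- str.maketrans/translate table of A and B, ported character by character (exact: 1-char -> 1-char map)
def leetChar (c : Char) : Char :=
  if c = '0' then 'o' else if c = '1' then 'l' else if c = '3' then 'e'
  else if c = '5' then 's' else if c = '7' then 't' else if c = '@' then 'a'
  else if c = '$' then 's' else c

-- DICTIONARY_WORDS: a Python set of distinct literals (as char lists; iteration order
-- does not affect the any/or result)
def dictWords : List (List Char) :=
  [['p', 'a', 's', 's', 'w', 'o', 'r', 'd'],
   ['w', 'e', 'l', 'c', 'o', 'm', 'e'],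
   ['d', 'r', 'a', 'g', 'o', 'n'],
   ['p', 'r', 'i', 'n', 'c', 'e', 's', 's'],
   ['f', 'o', 'o', 't', 'b', 'a', 'l', 'l'],
   ['f', 'l', 'o', 'w', 'e', 'r'],
   ['s', 'h', 'a', 'd', 'o', 'w'],
   ['h', 'u', 'n', 't', 'e', 'r'],
   ['p', 'u', 'r', 'p', 'l', 'e'],
   ['f', 'i', 'r', 'e'],
   ['l', 'i', 'l', 'y'],
   ['k', 'a', 'i', 'z', 'e', 'n'],
   ['s', 'u', 'm', 'm', 'e', 'r']]

def contains_dictionary_word (s : String) : Bool :=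
  let s_low := (PySem.Str.lower s).toList
  let variants : List (List Char) := [s_low, s_low.map leetChar]
  dictWords.any (fun word =>
    variants.any (fun v => PySem.Chars.isIn word v && decide (4 ≤ PySem.Chars.len word)))

-- ===== PORT B =====
-- sorted(DICTIONARY_WORDS): the set literal's words in sorted order (written out)
def sortedWords : List (List Char) :=
  [['d', 'r', 'a', 'g', 'o', 'n'],
   ['f', 'i', 'r', 'e'],
   ['f', 'l', 'o', 'w', 'e', 'r'],
   ['f', 'o', 'o', 't', 'b', 'a', 'l', 'l'],
   ['h', 'u', 'n', 't', 'e', 'r'],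
   ['k', 'a', 'i', 'z', 'e', 'n'],
   ['l', 'i', 'l', 'y'],
   ['p', 'a', 's', 's', 'w', 'o', 'r', 'd'],
   ['p', 'r', 'i', 'n', 'c', 'e', 's', 's'],
   ['p', 'u', 'r', 'p', 'l', 'e'],
   ['s', 'h', 'a', 'd', 'o', 'w'],
   ['s', 'u', 'm', 'm', 'e', 'r'],
   ['w', 'e', 'l', 'c', 'o', 'm', 'e']]

-- _build_trie: fold over the words, inner fold over the word's characters, exactly
-- Source B's array trie (children = list of dicts char->index, terminal = list of bools)
def buildTrie (words : List (List Char)) :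
    List (PySem.Dict Char Nat) × List Bool :=
  words.foldl (fun st w =>
    let r := w.foldl
      (fun (st2 : List (PySem.Dict Char Nat) × List Bool × Nat) c =>
        let (children, terminal, cur) := st2
        match PySem.Dict.get? (children.getD cur PySem.Dict.empty) c with
        | some nxt => (children, terminal, nxt)
        | none =>
          let children := children ++ [PySem.Dict.empty]
          let terminal := terminal ++ [false]
          let nxt := children.length - 1
          (children.set cur
            (PySem.Dict.insert (children.getD cur PySem.Dict.empty) c nxt),
           terminal, nxt))
      (st.1, st.2, 0)
    (r.1, r.2.1.set r.2.2 true))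
  ([PySem.Dict.empty], [false])

def trieChildren : List (PySem.Dict Char Nat) := (buildTrie sortedWords).1
def trieTerminal : List Bool := (buildTrie sortedWords).2

-- the inner 'for j in range(i, n)' loop: walk the trie along t[i:]
def trieWalk : Nat → List Char → Bool
  | _, [] => false
  | cur, c :: rest =>
    match PySem.Dict.get? (trieChildren.getD cur PySem.Dict.empty) c with
    | none => false
    | some nxt =>
      if trieTerminal.getD nxt false then true else trieWalk nxt rest

-- the outer 'for i in range(n)' loop: one walk per starting position
def trieScan : List Char → Bool
  | [] => false
  | c :: rest => trieWalk 0 (c :: rest) || trieScan rest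

def contains_dictionary_word_alt (s : String) : Bool :=
  trieScan ((PySem.Str.lower s).toList.map leetChar)

-- ===== PRECONDITION & SPEC =====
def Spec_contains_dictionary_word (s : String) (out : Bool) : Prop := out = contains_dictionary_word_alt s
instance (s : String) (out : Bool) : Decidable (Spec_contains_dictionary_word s out) := by unfold Spec_contains_dictionary_word; infer_instance

-- ===== CLAIM (what is proved, stated in full; the proofs are below) =====
def Claim_equal_contains_dictionary_word : Prop := ∀ (s : String), Dom_contains_dictionary_word s → Spec_contains_dictionary_word s (contains_dictionary_word s)

-- ===== LEMMAS AND PROOFS =====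


-- a word fixed by the leet translation that occurs in L also occurs in L.map leetChar
theorem isIn_or_map (L w : List Char) (hmap : w.map leetChar = w) :
    (PySem.Chars.isIn w L || PySem.Chars.isIn w (L.map leetChar))
      = PySem.Chars.isIn w (L.map leetChar) := by
  cases h : PySem.Chars.isIn w L
  · simp
  · have hinf : w <:+: L := (PySem.Chars.isIn_iff_infix w L).mp h
    have : w <:+: L.map leetChar := hmap ▸ hinf.map leetChar
    simp [(PySem.Chars.isIn_iff_infix w (L.map leetChar)).mpr this]

theorem any_words (L : List Char) (g : List Char → Bool) (ws : List (List Char))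
    (h : ∀ w ∈ ws, w.map leetChar = w ∧ g w = true) :
    (ws.any (fun w =>
        (PySem.Chars.isIn w L && g w) || (PySem.Chars.isIn w (L.map leetChar) && g w)))
      = ws.any (fun w => PySem.Chars.isIn w (L.map leetChar)) := by
  induction ws with
  | nil => rfl
  | cons w ws ih =>
    have hw := h w (by simp)
    simp only [List.any_cons, ih (fun x hx => h x (by simp [hx])), hw.2, Bool.and_true,
      isIn_or_map L w hw.1]

theorem dict_words_ok :
    ∀ w ∈ dictWords, w.map leetChar = w ∧ decide (4 ≤ PySem.Chars.len w) = true := by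
  decide

-- Stab cur = the suffixes of the sorted words whose consumed prefix leads to trie node cur
def Stab : List (List (List Char)) :=
  [[['d', 'r', 'a', 'g', 'o', 'n'], ['f', 'i', 'r', 'e'], ['f', 'l', 'o', 'w', 'e', 'r'], ['f', 'o', 'o', 't', 'b', 'a', 'l', 'l'], ['h', 'u', 'n', 't', 'e', 'r'], ['k', 'a', 'i', 'z', 'e', 'n'], ['l', 'i', 'l', 'y'], ['p', 'a', 's', 's', 'w', 'o', 'r', 'd'], ['p', 'r', 'i', 'n', 'c', 'e', 's', 's'], ['p', 'u', 'r', 'p', 'l', 'e'], ['s', 'h', 'a', 'd', 'o', 'w'], ['s', 'u', 'm', 'm', 'e', 'r'], ['w', 'e', 'l', 'c', 'o', 'm', 'e']],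
   [['r', 'a', 'g', 'o', 'n']],
   [['a', 'g', 'o', 'n']],
   [['g', 'o', 'n']],
   [['o', 'n']],
   [['n']],
   [],
   [['i', 'r', 'e'], ['l', 'o', 'w', 'e', 'r'], ['o', 'o', 't', 'b', 'a', 'l', 'l']],
   [['r', 'e']],
   [['e']],
   [],
   [['o', 'w', 'e', 'r']],
   [['w', 'e', 'r']],
   [['e', 'r']],
   [['r']],
   [],
   [['o', 't', 'b', 'a', 'l', 'l']],
   [['t', 'b', 'a', 'l', 'l']],
   [['b', 'a', 'l', 'l']],
   [['a', 'l', 'l']],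
   [['l', 'l']],
   [['l']],
   [],
   [['u', 'n', 't', 'e', 'r']],
   [['n', 't', 'e', 'r']],
   [['t', 'e', 'r']],
   [['e', 'r']],
   [['r']],
   [],
   [['a', 'i', 'z', 'e', 'n']],
   [['i', 'z', 'e', 'n']],
   [['z', 'e', 'n']],
   [['e', 'n']],
   [['n']],
   [],
   [['i', 'l', 'y']],
   [['l', 'y']],
   [['y']],
   [],
   [['a', 's', 's', 'w', 'o', 'r', 'd'], ['r', 'i', 'n', 'c', 'e', 's', 's'], ['u', 'r', 'p', 'l', 'e']],
   [['s', 's', 'w', 'o', 'r', 'd']],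
   [['s', 'w', 'o', 'r', 'd']],
   [['w', 'o', 'r', 'd']],
   [['o', 'r', 'd']],
   [['r', 'd']],
   [['d']],
   [],
   [['i', 'n', 'c', 'e', 's', 's']],
   [['n', 'c', 'e', 's', 's']],
   [['c', 'e', 's', 's']],
   [['e', 's', 's']],
   [['s', 's']],
   [['s']],
   [],
   [['r', 'p', 'l', 'e']],
   [['p', 'l', 'e']],
   [['l', 'e']],
   [['e']],
   [],
   [['h', 'a', 'd', 'o', 'w'], ['u', 'm', 'm', 'e', 'r']],
   [['a', 'd', 'o', 'w']],
   [['d', 'o', 'w']],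
   [['o', 'w']],
   [['w']],
   [],
   [['m', 'm', 'e', 'r']],
   [['m', 'e', 'r']],
   [['e', 'r']],
   [['r']],
   [],
   [['e', 'l', 'c', 'o', 'm', 'e']],
   [['l', 'c', 'o', 'm', 'e']],
   [['c', 'o', 'm', 'e']],
   [['o', 'm', 'e']],
   [['m', 'e']],
   [['e']],
   []]


-- the per-character transition on a suffix set: keep the tails (of length >= 1) of the
-- suffixes starting with c
def stepSuf (c : Char) (w : List Char) : Option (List Char) :=
  match w with
  | c' :: v :: vs => if c' = c then some (v :: vs) else none
  | _ => none

-- the trie the build fold produces, as literal tables (so the finite facts below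
-- evaluate over literals)
def trieChildrenL : List (PySem.Dict Char Nat) :=
  [PySem.Dict.ofList [('d', 1), ('f', 7), ('h', 23), ('k', 29), ('l', 35), ('p', 39), ('s', 59), ('w', 70)],
   PySem.Dict.ofList [('r', 2)],
   PySem.Dict.ofList [('a', 3)],
   PySem.Dict.ofList [('g', 4)],
   PySem.Dict.ofList [('o', 5)],
   PySem.Dict.ofList [('n', 6)],
   PySem.Dict.ofList [],
   PySem.Dict.ofList [('i', 8), ('l', 11), ('o', 16)],
   PySem.Dict.ofList [('r', 9)],
   PySem.Dict.ofList [('e', 10)],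
   PySem.Dict.ofList [],
   PySem.Dict.ofList [('o', 12)],
   PySem.Dict.ofList [('w', 13)],
   PySem.Dict.ofList [('e', 14)],
   PySem.Dict.ofList [('r', 15)],
   PySem.Dict.ofList [],
   PySem.Dict.ofList [('o', 17)],
   PySem.Dict.ofList [('t', 18)],
   PySem.Dict.ofList [('b', 19)],
   PySem.Dict.ofList [('a', 20)],
   PySem.Dict.ofList [('l', 21)],
   PySem.Dict.ofList [('l', 22)],
   PySem.Dict.ofList [],
   PySem.Dict.ofList [('u', 24)],
   PySem.Dict.ofList [('n', 25)],
   PySem.Dict.ofList [('t', 26)],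
   PySem.Dict.ofList [('e', 27)],
   PySem.Dict.ofList [('r', 28)],
   PySem.Dict.ofList [],
   PySem.Dict.ofList [('a', 30)],
   PySem.Dict.ofList [('i', 31)],
   PySem.Dict.ofList [('z', 32)],
   PySem.Dict.ofList [('e', 33)],
   PySem.Dict.ofList [('n', 34)],
   PySem.Dict.ofList [],
   PySem.Dict.ofList [('i', 36)],
   PySem.Dict.ofList [('l', 37)],
   PySem.Dict.ofList [('y', 38)],
   PySem.Dict.ofList [],
   PySem.Dict.ofList [('a', 40), ('r', 47), ('u', 54)],
   PySem.Dict.ofList [('s', 41)],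
   PySem.Dict.ofList [('s', 42)],
   PySem.Dict.ofList [('w', 43)],
   PySem.Dict.ofList [('o', 44)],
   PySem.Dict.ofList [('r', 45)],
   PySem.Dict.ofList [('d', 46)],
   PySem.Dict.ofList [],
   PySem.Dict.ofList [('i', 48)],
   PySem.Dict.ofList [('n', 49)],
   PySem.Dict.ofList [('c', 50)],
   PySem.Dict.ofList [('e', 51)],
   PySem.Dict.ofList [('s', 52)],
   PySem.Dict.ofList [('s', 53)],
   PySem.Dict.ofList [],
   PySem.Dict.ofList [('r', 55)],
   PySem.Dict.ofList [('p', 56)],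
   PySem.Dict.ofList [('l', 57)],
   PySem.Dict.ofList [('e', 58)],
   PySem.Dict.ofList [],
   PySem.Dict.ofList [('h', 60), ('u', 65)],
   PySem.Dict.ofList [('a', 61)],
   PySem.Dict.ofList [('d', 62)],
   PySem.Dict.ofList [('o', 63)],
   PySem.Dict.ofList [('w', 64)],
   PySem.Dict.ofList [],
   PySem.Dict.ofList [('m', 66)],
   PySem.Dict.ofList [('m', 67)],
   PySem.Dict.ofList [('e', 68)],
   PySem.Dict.ofList [('r', 69)],
   PySem.Dict.ofList [],
   PySem.Dict.ofList [('e', 71)],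
   PySem.Dict.ofList [('l', 72)],
   PySem.Dict.ofList [('c', 73)],
   PySem.Dict.ofList [('o', 74)],
   PySem.Dict.ofList [('m', 75)],
   PySem.Dict.ofList [('e', 76)],
   PySem.Dict.ofList []]

def trieTerminalL : List Bool :=
  [false, false, false, false, false, false, true, false, false, false, true, false, false, false, false, true, false, false, false, false, false, false, true, false, false, false, false, false, true, false, false, false, false, false, true, false, false, false, true, false, false, false, false, false, false, false, true, false, false, false, false, false, false, true, false, false, false, false, true, false, false, false, false, false, true, false, false, false, false, true, false, false, false, false, false, false, true]

set_option maxRecDepth 4000 in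
theorem trieChildren_eq : trieChildren = trieChildrenL := by decide

set_option maxRecDepth 4000 in
theorem trieTerminal_eq : trieTerminal = trieTerminalL := by decide

-- finite facts tying the trie tables to the Stab suffix table (checked by evaluation)
theorem stab_perm : (Stab.getD 0 []).Perm dictWords := by decide

theorem root_lt : 0 < trieChildrenL.length := by decide

set_option maxRecDepth 10000 in
theorem tf1 : ∀ cur < trieChildrenL.length, ∀ w ∈ Stab.getD cur [],
    w ≠ [] ∧ (PySem.Dict.get? (trieChildrenL.getD cur PySem.Dict.empty) w.headI).isSome = true := by
  decide

set_option maxRecDepth 10000 in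
theorem tf2 : ∀ cur < trieChildrenL.length,
    ∀ p ∈ (trieChildrenL.getD cur PySem.Dict.empty).items,
      p.2 < trieChildrenL.length ∧
      trieTerminalL.getD p.2 false = decide ([p.1] ∈ Stab.getD cur []) ∧
      Stab.getD p.2 [] = (Stab.getD cur []).filterMap (stepSuf p.1) := by
  decide

theorem trieWalk_cons_none {cur : Nat} {c : Char} {rest : List Char}
    (h : PySem.Dict.get? (trieChildrenL.getD cur PySem.Dict.empty) c = none) :
    trieWalk cur (c :: rest) = false := by
  rw [trieWalk, trieChildren_eq, trieTerminal_eq, h]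

theorem trieWalk_cons_some {cur : Nat} {c : Char} {rest : List Char} {nxt : Nat}
    (h : PySem.Dict.get? (trieChildrenL.getD cur PySem.Dict.empty) c = some nxt) :
    trieWalk cur (c :: rest) =
      if trieTerminalL.getD nxt false then true else trieWalk nxt rest := by
  rw [trieWalk, trieChildren_eq, trieTerminal_eq, h]

theorem walk_correct (u : List Char) : ∀ cur, cur < trieChildrenL.length →
    (trieWalk cur u = true ↔ ∃ w ∈ Stab.getD cur [], w <+: u) := by
  induction u with
  | nil =>
    intro cur hcur
    simp only [trieWalk]
    constructor
    · intro h; exact absurd h (by simp)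
    · rintro ⟨w, hw, hp⟩
      exact absurd (List.prefix_nil.mp hp) (tf1 cur hcur w hw).1
  | cons c rest ih =>
    intro cur hcur
    cases hg : PySem.Dict.get? (trieChildrenL.getD cur PySem.Dict.empty) c with
    | none =>
      rw [trieWalk_cons_none hg]
      simp only [Bool.false_eq_true, false_iff]
      rintro ⟨w, hw, hp⟩
      obtain ⟨hne, hsome⟩ := tf1 cur hcur w hw
      match w, hne with
      | c' :: v, _ =>
        obtain ⟨hc, -⟩ := List.cons_prefix_cons.mp hp
        subst hc
        simp only [List.headI, hg] at hsome
        exact absurd hsome (by simp)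
    | some nxt =>
      rw [trieWalk_cons_some hg]
      have hmem := PySem.Dict.mem_items_of_get?_eq_some _ hg
      obtain ⟨hlt, hterm, hstab⟩ := tf2 cur hcur (c, nxt) hmem
      by_cases ht : trieTerminalL.getD nxt false = true
      · rw [if_pos ht]
        constructor
        · intro _
          exact ⟨[c], of_decide_eq_true (hterm ▸ ht), by simp⟩
        · intro _; rfl
      · rw [if_neg ht, ih nxt hlt]
        constructor
        · rintro ⟨v, hv, hvp⟩
          rw [hstab, List.mem_filterMap] at hv
          obtain ⟨w, hw, hf⟩ := hv
          match w, hf with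
          | c' :: v1 :: vs, hf =>
            simp only [stepSuf] at hf
            split_ifs at hf with hc
            obtain rfl := Option.some.inj hf
            exact ⟨c :: v1 :: vs, hc ▸ hw, List.cons_prefix_cons.mpr ⟨rfl, hvp⟩⟩
        · rintro ⟨w, hw, hp⟩
          obtain ⟨hne, -⟩ := tf1 cur hcur w hw
          match w, hne with
          | c' :: v, _ =>
            obtain ⟨hc, hvp⟩ := List.cons_prefix_cons.mp hp
            subst hc
            match v, hvp with
            | [], _ =>
              exact absurd (hterm ▸ decide_eq_true hw) ht
            | v1 :: vs, hvp =>
              refine ⟨v1 :: vs, ?_, hvp⟩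
              rw [hstab, List.mem_filterMap]
              exact ⟨c' :: v1 :: vs, hw, by simp [stepSuf]⟩

theorem scan_correct (u : List Char) :
    (trieScan u = true ↔ ∃ w ∈ Stab.getD 0 [], w <:+: u) := by
  induction u with
  | nil =>
    simp only [trieScan]
    constructor
    · intro h; exact absurd h (by simp)
    · rintro ⟨w, hw, hp⟩
      exact absurd (List.eq_nil_of_infix_nil hp) (tf1 0 root_lt w hw).1
  | cons c rest ih =>
    simp only [trieScan, Bool.or_eq_true, ih, walk_correct (c :: rest) 0 root_lt]
    constructor
    · rintro (⟨w, hw, hp⟩ | ⟨w, hw, hp⟩)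
      · exact ⟨w, hw, hp.isInfix⟩
      · exact ⟨w, hw, hp.trans (List.suffix_cons c rest).isInfix⟩
    · rintro ⟨w, hw, hp⟩
      rcases List.infix_cons_iff.mp hp with h | h
      · exact Or.inl ⟨w, hw, h⟩
      · exact Or.inr ⟨w, hw, h⟩

theorem scan_eq_any (u : List Char) :
    dictWords.any (fun w => PySem.Chars.isIn w u) = trieScan u := by
  rw [Bool.eq_iff_iff, List.any_eq_true, scan_correct]
  constructor
  · rintro ⟨w, hw, hin⟩
    exact ⟨w, stab_perm.mem_iff.mpr hw, (PySem.Chars.isIn_iff_infix w u).mp hin⟩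
  · rintro ⟨w, hw, hinf⟩
    exact ⟨w, stab_perm.mem_iff.mp hw, (PySem.Chars.isIn_iff_infix w u).mpr hinf⟩

-- ===== VERDICT (by name: the statement is the Claim_ definition above) =====
theorem contains_dictionary_word_spec : Claim_equal_contains_dictionary_word := by
  intro s _
  unfold Spec_contains_dictionary_word contains_dictionary_word contains_dictionary_word_alt
  simp only [List.any_cons, List.any_nil, Bool.or_false]
  rw [any_words (PySem.Str.lower s).toList (fun w => decide (4 ≤ PySem.Chars.len w))
    dictWords dict_words_ok]
  exact scan_eq_any ((PySem.Str.lower s).toList.map leetChar)
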